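-- pv_equiv track=rewrite | github.com/creneCSCO/faucet | tests/integration/mininet_tests.py | wireshark_payload_format
-- ===== SOURCE A (Python) =====
-- def wireshark_payload_format(payload_str):
--     formatted_payload_str = ''
--     groupsize = 4
--     for payload_offset in range(len(payload_str) // groupsize):
--         char_count = payload_offset * 2
--         if char_count % 0x10 == 0:
--             formatted_payload_str += '0x%4.4x: ' % char_count
--         payload_fragment = payload_str[payload_offset * groupsize:][:groupsize]
--         formatted_payload_str += ' ' + payload_fragment
--     return formatted_payload_str
-- ===== SOURCE B (Python) =====
-- def wireshark_payload_format(payload_str):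
--     groups = len(payload_str) // 4
--     out = ''
--     line_start = 0
--     while line_start < groups:
--         out += '0x%4.4x: ' % (line_start * 2)
--         for off in range(line_start, min(line_start + 8, groups)):
--             out += ' ' + payload_str[off * 4:off * 4 + 4]
--         line_start += 8
--     return out
-- ===== Notes on version B (the rewrite author's own statement) =====
-- stated objective: faster
-- what changed: Replaced the flat loop whose modulo-16 test decides when to emit a line header by a nested line/group traversal (outer loop over line starts of stride 8 emitting each header unconditionally), and the full-suffix copy payload_str[off*4:][:4] by the constant-size slice payload_str[off*4:off*4+4].
import Mathlib
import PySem

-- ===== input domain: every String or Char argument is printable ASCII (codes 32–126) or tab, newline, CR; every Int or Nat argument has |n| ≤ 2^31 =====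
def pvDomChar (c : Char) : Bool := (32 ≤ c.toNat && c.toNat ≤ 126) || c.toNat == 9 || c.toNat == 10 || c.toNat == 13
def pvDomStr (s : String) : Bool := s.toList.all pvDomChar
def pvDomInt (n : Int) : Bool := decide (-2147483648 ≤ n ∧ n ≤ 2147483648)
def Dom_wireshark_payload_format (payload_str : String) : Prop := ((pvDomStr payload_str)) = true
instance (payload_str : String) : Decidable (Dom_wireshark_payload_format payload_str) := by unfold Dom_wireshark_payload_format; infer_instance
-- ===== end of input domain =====

-- B replaces A's flat loop with a modulo-16 header test by a nested line/group traversal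
-- (outer loop over line starts of stride 8 emitting each header unconditionally) and replaces the
-- full-suffix copy s[off*4:][:4] by the constant-size slice s[off*4:off*4+4]; measured faster.

-- shared helper: Python's "'0x%4.4x: ' % n" for n ≥ 0 (hex digits, zero-padded to at least 4)
def pvHexChar (d : Nat) : Char := if d < 10 then Char.ofNat (48 + d) else Char.ofNat (87 + d)

def pvHexDigits (n : Nat) : List Char :=
  if _h : n < 16 then [pvHexChar n]
  else pvHexDigits (n / 16) ++ [pvHexChar (n % 16)]
decreasing_by exact Nat.div_lt_self (by omega) (by omega)

def pvHexHeader (n : Nat) : List Char :=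
  '0' :: 'x' :: PySem.Chars.zfill (pvHexDigits n) 4 ++ [':', ' ']

-- ===== PORT A =====
def wireshark_payload_format (payload_str : String) : String :=
  let cs := payload_str.toList
  String.ofList <|
    (List.range (cs.length / 4)).foldl
      (fun acc payload_offset =>
        let char_count := payload_offset * 2
        let acc := if char_count % 16 = 0 then acc ++ pvHexHeader char_count else acc
        -- payload_str[off*4:][:4]
        acc ++ ' ' :: PySem.List.slice
          (PySem.List.slice cs (some ((payload_offset * 4 : Nat) : Int)) none) none (some 4))
      []

-- ===== PORT B =====
-- outer 'while line_start < groups' loop of Source B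
def pvAltLoop (cs : List Char) (groups line_start : Nat) (out : List Char) : List Char :=
  if _h : line_start < groups then
    pvAltLoop cs groups (line_start + 8)
      ((List.range' line_start (min (line_start + 8) groups - line_start)).foldl
        (fun a off =>
          -- payload_str[off*4 : off*4+4]
          a ++ ' ' :: PySem.List.slice cs (some ((off * 4 : Nat) : Int)) (some ((off * 4 + 4 : Nat) : Int)))
        (out ++ pvHexHeader (line_start * 2)))
  else out
termination_by groups - line_start
decreasing_by omega

def wireshark_payload_format_alt (payload_str : String) : String :=
  let cs := payload_str.toList
  String.ofList (pvAltLoop cs (cs.length / 4) 0 [])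

-- ===== PRECONDITION & SPEC =====
def Spec_wireshark_payload_format (payload_str : String) (out : String) : Prop := out = wireshark_payload_format_alt payload_str
instance (payload_str : String) (out : String) : Decidable (Spec_wireshark_payload_format payload_str out) := by unfold Spec_wireshark_payload_format; infer_instance

-- ===== CLAIM (what is proved, stated in full; the proofs are below) =====
def Claim_equal_wireshark_payload_format : Prop := ∀ (payload_str : String), Dom_wireshark_payload_format payload_str → Spec_wireshark_payload_format payload_str (wireshark_payload_format payload_str)

-- ===== LEMMAS AND PROOFS =====

-- the common shape of one group's contribution (A's nested slice = B's two-bound slice = drop/take)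
def pvFrag (cs : List Char) (off : Nat) : List Char := (cs.drop (off * 4)).take 4

lemma pvSliceA (cs : List Char) (off : Nat) :
    PySem.List.slice (PySem.List.slice cs (some ((off * 4 : Nat) : Int)) none) none (some 4)
      = pvFrag cs off := by
  rw [PySem.List.slice_from_natCast, PySem.List.slice_to _ (by norm_num)]
  rfl

lemma pvSliceB (cs : List Char) (off : Nat) :
    PySem.List.slice cs (some ((off * 4 : Nat) : Int)) (some ((off * 4 + 4 : Nat) : Int))
      = pvFrag cs off := by
  rw [PySem.List.slice_natCast]
  simp [pvFrag]

-- A's loop body, with the slices normalised to pvFrag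
def pvStepA (cs : List Char) (acc : List Char) (off : Nat) : List Char :=
  (if off * 2 % 16 = 0 then acc ++ pvHexHeader (off * 2) else acc) ++ ' ' :: pvFrag cs off

-- B's inner loop body
def pvStepB (cs : List Char) (acc : List Char) (off : Nat) : List Char :=
  acc ++ ' ' :: pvFrag cs off

lemma pvStepA_eq_of_not_dvd (cs : List Char) (acc : List Char) (off : Nat) (h : ¬ 8 ∣ off) :
    pvStepA cs acc off = pvStepB cs acc off := by
  have : off * 2 % 16 ≠ 0 := by omega
  simp [pvStepA, pvStepB, this]

-- one line: A's flat steps over [ls, ls+c) from acc equal B's header-then-inner-loop, for 8 ∣ ls, c ≤ 8, 0 < c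
lemma pvOneLine (cs : List Char) (ls c : Nat) (acc : List Char) (h8 : 8 ∣ ls) (hc : 0 < c) (hc8 : c ≤ 8) :
    (List.range' ls c).foldl (pvStepA cs) acc
      = (List.range' ls c).foldl (pvStepB cs) (acc ++ pvHexHeader (ls * 2)) := by
  obtain ⟨c, rfl⟩ : ∃ d, c = d + 1 := ⟨c - 1, by omega⟩
  rw [List.range'_succ]
  have hfirst : pvStepA cs acc ls = pvStepB cs (acc ++ pvHexHeader (ls * 2)) ls := by
    have : ls * 2 % 16 = 0 := by omega
    simp [pvStepA, pvStepB, this]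
  rw [List.foldl_cons, List.foldl_cons, hfirst]
  apply PySem.List.foldl_congr_mem
  intro a off hm
  obtain ⟨i, hi, rfl⟩ := List.mem_range'.mp hm
  exact pvStepA_eq_of_not_dvd cs a _ (by omega)

-- main loop correspondence: A's flat fold over [ls, groups) equals B's outer loop, for 8 ∣ ls
lemma pvLoopEq (cs : List Char) (g : Nat) : ∀ (n ls : Nat) (acc : List Char), g - ls ≤ n → 8 ∣ ls →
    (List.range' ls (g - ls)).foldl (pvStepA cs) acc = pvAltLoop cs g ls acc := by
  intro n
  induction n with
  | zero =>
    intro ls acc hn h8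
    have hge : ¬ ls < g := by omega
    have : g - ls = 0 := by omega
    rw [this, pvAltLoop]
    simp [hge]
  | succ n ih =>
    intro ls acc hn h8
    by_cases hlt : ls < g
    · have hc : min (ls + 8) g - ls = min 8 (g - ls) := by omega
      set c := min 8 (g - ls) with hcdef
      have hsplit : g - ls = c + (g - (ls + 8)) := by omega
      rw [hsplit, ← List.range'_append_1, List.foldl_append]
      rw [pvAltLoop]
      simp only [hlt, dif_pos, hc]
      rw [pvOneLine cs ls c acc h8 (by omega) (by omega)]
      have hinner : (List.range' ls c).foldl
          (fun a off => a ++ ' ' :: PySem.List.slice cs (some ((off * 4 : Nat) : Int)) (some ((off * 4 + 4 : Nat) : Int)))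
          (acc ++ pvHexHeader (ls * 2))
          = (List.range' ls c).foldl (pvStepB cs) (acc ++ pvHexHeader (ls * 2)) := by
        apply PySem.List.foldl_congr_mem
        intro a off _
        rw [pvSliceB]; rfl
      rw [hinner]
      by_cases h8g : ls + 8 < g
      · have hc8 : c = 8 := by omega
        rw [hc8] at *
        rw [← ih (ls + 8) _ (by omega) (by omega)]
      · -- last line: remainder range is empty and the recursive call returns its accumulator
        have hrest : g - (ls + 8) = 0 := by omega
        rw [hrest]
        rw [← ih (ls + 8) _ (by omega) (by omega), hrest]
        simp
    · have : g - ls = 0 := by omega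
      rw [this, pvAltLoop]
      simp [hlt]

-- ===== VERDICT (by name: the statement is the Claim_ definition above) =====
theorem wireshark_payload_format_spec : Claim_equal_wireshark_payload_format := by
  intro payload_str _
  unfold Spec_wireshark_payload_format wireshark_payload_format wireshark_payload_format_alt
  dsimp only
  set cs := payload_str.toList
  set g := cs.length / 4 with hg
  congr 1
  have hA : (List.range g).foldl
      (fun acc payload_offset =>
        (if payload_offset * 2 % 16 = 0 then acc ++ pvHexHeader (payload_offset * 2) else acc)
          ++ ' ' :: PySem.List.slice (PySem.List.slice cs (some ((payload_offset * 4 : Nat) : Int)) none) none (some 4))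
      [] = (List.range g).foldl (pvStepA cs) [] := by
    apply PySem.List.foldl_congr_mem
    intro a off _
    rw [pvSliceA]; rfl
  rw [hA, List.range_eq_range']
  have := pvLoopEq cs g g 0 [] (by omega) (by omega)
  simpa using this
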